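-- pv_equiv track=rewrite | github.com/ajay06o/Mental_Health_APP | ai_models/mental_health_model.py | detect_mood_volatility
-- ===== SOURCE A (Python) =====
-- def detect_mood_volatility(history):
--
--     if not history or len(history) < 4:
--         return "stable"
--
--     changes = 0
--
--     for i in range(1, len(history)):
--         if history[i] != history[i-1]:
--             changes += 1
--
--     if changes >= len(history) / 2:
--         return "high_volatility"
--
--     return "stable"
-- ===== SOURCE B (Python) =====
-- def detect_mood_volatility(history):
--     if not history or len(history) < 4:
--         return "stable"
--     n = len(history)
--
--     def changes_in(lo, hi):
--         # adjacent changes strictly inside history[lo:hi], divide and conquer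
--         if hi - lo <= 1:
--             return 0
--         mid = (lo + hi) // 2
--         return changes_in(lo, mid) + changes_in(mid, hi) + (history[mid - 1] != history[mid])
--
--     changes = changes_in(0, n)
--     if changes >= n / 2:
--         return "high_volatility"
--     return "stable"
-- ===== Notes on version B (the rewrite author's own statement) =====
-- stated objective: alternative
-- what changed: Replaces A's linear index loop over adjacent pairs with a divide-and-conquer recursion over index ranges: changes in [lo,hi) = changes in the left half + changes in the right half + one boundary comparison at the midpoint.
import Mathlib
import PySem

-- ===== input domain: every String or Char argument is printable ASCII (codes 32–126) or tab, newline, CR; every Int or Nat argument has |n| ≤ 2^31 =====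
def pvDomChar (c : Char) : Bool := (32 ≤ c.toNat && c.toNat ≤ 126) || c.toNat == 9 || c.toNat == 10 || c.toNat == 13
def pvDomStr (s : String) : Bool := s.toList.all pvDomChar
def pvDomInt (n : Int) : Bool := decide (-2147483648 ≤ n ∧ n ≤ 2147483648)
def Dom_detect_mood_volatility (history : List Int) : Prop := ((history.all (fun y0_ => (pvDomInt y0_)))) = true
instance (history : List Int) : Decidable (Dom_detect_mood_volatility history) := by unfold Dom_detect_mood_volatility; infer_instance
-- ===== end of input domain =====

-- B computes the number of adjacent changes by divide-and-conquer over index ranges instead of A's linear index loop; objective: alternative decomposition, same cost.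
-- In both ports 'changes >= len(history)/2' (Python float division) is ported as '2*changes ≥ len' — exact for these integer magnitudes.

-- ===== PORT A =====
def detect_mood_volatility (history : List Int) : String :=
  if history = [] ∨ history.length < 4 then "stable"
  else
    let changes : Int :=
      (PySem.List.pyRange 1 (history.length : Int) 1).foldl
        (fun changes i =>
          if PySem.List.pyGetD history i 0 ≠ PySem.List.pyGetD history (i - 1) 0 then
            changes + 1
          else changes) 0
    if 2 * changes ≥ (history.length : Int) then "high_volatility" else "stable"

-- ===== PORT B =====
-- Source B's changes_in(lo, hi): the indices used (mid-1, mid) are always in range, so Python's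
-- h[...] is exact as List.getD here; '(lo+hi)//2' has nonnegative operands, so Nat '/' is exact.
def pvCC (h : List Int) (lo hi : Nat) : Int :=
  if hi - lo ≤ 1 then 0
  else
    let mid := (lo + hi) / 2
    pvCC h lo mid + pvCC h mid hi +
      (if h.getD (mid - 1) 0 ≠ h.getD mid 0 then 1 else 0)
termination_by hi - lo
decreasing_by all_goals omega

def detect_mood_volatility_alt (history : List Int) : String :=
  if history = [] ∨ history.length < 4 then "stable"
  else
    let changes : Int := pvCC history 0 history.length
    if 2 * changes ≥ (history.length : Int) then "high_volatility" else "stable"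

-- ===== PRECONDITION & SPEC =====
def Spec_detect_mood_volatility (history : List Int) (out : String) : Prop := out = detect_mood_volatility_alt history
instance (history : List Int) (out : String) : Decidable (Spec_detect_mood_volatility history out) := by unfold Spec_detect_mood_volatility; infer_instance

-- ===== CLAIM (what is proved, stated in full; the proofs are below) =====
def Claim_equal_detect_mood_volatility : Prop := ∀ (history : List Int), Dom_detect_mood_volatility history → Spec_detect_mood_volatility history (detect_mood_volatility history)

-- ===== LEMMAS AND PROOFS =====

-- number of adjacent unequal pairs
def pvCnt : List Int → Int
  | [] => 0
  | [_] => 0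
  | x :: y :: t => (if x ≠ y then 1 else 0) + pvCnt (y :: t)

-- segment version of the change count, as a countP over the interior boundary indices
def pvSeg (h : List Int) (lo hi : Nat) : Int :=
  ((List.range' (lo + 1) (hi - lo - 1)).countP
    (fun i => decide (h.getD (i - 1) 0 ≠ h.getD i 0)) : Int)

theorem pvCC_eq_seg (h : List Int) : ∀ n lo hi, hi - lo ≤ n → pvCC h lo hi = pvSeg h lo hi := by
  intro n
  induction n with
  | zero =>
    intro lo hi hle
    rw [pvCC, if_pos (by omega)]
    simp [pvSeg, show hi - lo - 1 = 0 by omega]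
  | succ n ih =>
    intro lo hi hle
    by_cases hsm : hi - lo ≤ 1
    · rw [pvCC, if_pos hsm]
      simp [pvSeg, show hi - lo - 1 = 0 by omega]
    · rw [pvCC, if_neg hsm]
      show pvCC h lo ((lo + hi) / 2) + pvCC h ((lo + hi) / 2) hi +
          (if h.getD ((lo + hi) / 2 - 1) 0 ≠ h.getD ((lo + hi) / 2) 0 then 1 else 0)
        = pvSeg h lo hi
      set mid := (lo + hi) / 2 with hmid
      have h1 : lo < mid := by omega
      have h2 : mid < hi := by omega
      rw [ih lo mid (by omega), ih mid hi (by omega)]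
      unfold pvSeg
      have hsplit : List.range' (lo + 1) (hi - lo - 1)
          = (List.range' (lo + 1) (mid - lo - 1) ++ List.range' mid 1)
            ++ List.range' (mid + 1) (hi - mid - 1) := by
        have a3 : hi - lo - 1 = ((mid - lo - 1) + 1) + (hi - mid - 1) := by omega
        rw [a3, ← List.range'_append_1, ← List.range'_append_1,
            show (lo + 1) + ((mid - lo - 1) + 1) = mid + 1 by omega,
            show (lo + 1) + (mid - lo - 1) = mid by omega]
      rw [hsplit, List.countP_append, List.countP_append]
      simp only [List.range'_one, List.countP_cons, List.countP_nil]
      by_cases hb : h.getD (mid - 1) 0 = h.getD mid 0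
      · rw [List.getD_eq_getElem?_getD, List.getD_eq_getElem?_getD] at hb
        rw [if_neg (by simp [List.getD_eq_getElem?_getD, hb])]
        push_cast
        simp [hb]
      · rw [if_pos hb]
        rw [List.getD_eq_getElem?_getD, List.getD_eq_getElem?_getD] at hb
        push_cast
        simp [hb]
        ring

-- the countP form equals the head-recursive pvCnt
theorem pvSeg_zero_eq_cnt : ∀ (xs : List Int) (x : Int),
    pvSeg (x :: xs) 0 (x :: xs).length = pvCnt (x :: xs) := by
  intro xs
  induction xs with
  | nil => intro x; rfl
  | cons y t ih =>
    intro x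
    unfold pvSeg at *
    have hlen : (x :: y :: t).length - 0 - 1 = t.length + 1 := by simp
    rw [hlen, show (0:Nat) + 1 = 1 from rfl,
        show t.length + 1 = 1 + t.length by omega, ← List.range'_append]
    rw [List.countP_append]
    have hshift : (List.range' (1 + 1) t.length).countP
        (fun i => decide ((x :: y :: t).getD (i - 1) 0 ≠ (x :: y :: t).getD i 0))
        = (List.range' 1 t.length).countP
        (fun i => decide ((y :: t).getD (i - 1) 0 ≠ (y :: t).getD i 0)) := by
      rw [show (1 + 1 : Nat) = 1 + 1 from rfl, List.range'_eq_map_range,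
          List.range'_eq_map_range, List.countP_map, List.countP_map]
      apply List.countP_congr
      intro k hk
      simp only [Function.comp_apply]
      have e1 : 1 + 1 + k - 1 = (1 + k - 1) + 1 := by omega
      have e2 : 1 + 1 + k = (1 + k) + 1 := by omega
      rw [e1, e2]
      simp [List.getD]
    rw [hshift]
    have h0 : (List.range' 1 1).countP
        (fun i => decide ((x :: y :: t).getD (i - 1) 0 ≠ (x :: y :: t).getD i 0))
        = if x ≠ y then 1 else 0 := by
      simp [List.getD, ne_comm]
    have := ih y
    have hlen' : (y :: t).length - 0 - 1 = t.length := by simp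
    rw [hlen', show (0:Nat)+1 = 1 from rfl] at this
    rw [h0, pvCnt, ← this]
    push_cast
    by_cases hxy : x ≠ y <;> simp [hxy]

-- A's fold over range(1, len) counts the adjacent unequal pairs (via pvGetD on Nat casts)
theorem pvCountP_eq_cnt : ∀ (xs : List Int) (x : Int),
    ((List.range xs.length).countP
      (fun k : Nat => decide (PySem.List.pyGetD (x :: xs) (1 + (k : Int)) 0
                        ≠ PySem.List.pyGetD (x :: xs) (1 + (k : Int) - 1) 0)) : Int)
    = pvCnt (x :: xs) := by
  intro xs
  induction xs with
  | nil => intro x; rfl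
  | cons y t ih =>
    intro x
    have hlen : (y :: t).length = t.length + 1 := by simp
    rw [hlen, List.range_succ_eq_map, List.countP_cons, List.countP_map]
    have hshift : ((List.range t.length).countP
        ((fun k : Nat => decide (PySem.List.pyGetD (x :: y :: t) (1 + (k : Int)) 0
                  ≠ PySem.List.pyGetD (x :: y :: t) (1 + (k : Int) - 1) 0)) ∘ Nat.succ))
        = ((List.range t.length).countP
        (fun k : Nat => decide (PySem.List.pyGetD (y :: t) (1 + (k : Int)) 0
                  ≠ PySem.List.pyGetD (y :: t) (1 + (k : Int) - 1) 0))) := by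
      apply List.countP_congr
      intro k _
      simp only [Function.comp_apply]
      have e1 : (1 + ((k.succ : Nat) : Int)) = (((k + 2 : Nat)) : Int) := by push_cast; ring
      have e2 : (1 + ((k.succ : Nat) : Int) - 1) = (((k + 1 : Nat)) : Int) := by push_cast; ring
      have e3 : (1 + (k : Int)) = (((k + 1 : Nat)) : Int) := by push_cast; ring
      have e4 : (1 + (k : Int) - 1) = ((k : Nat) : Int) := by ring
      rw [e2, e1, e4, e3, PySem.List.pyGetD_natCast, PySem.List.pyGetD_natCast,
          PySem.List.pyGetD_natCast, PySem.List.pyGetD_natCast]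
      simp [List.getD]
    have h0 : (decide (PySem.List.pyGetD (x :: y :: t) (1 + ((0 : Nat) : Int)) 0
                ≠ PySem.List.pyGetD (x :: y :: t) (1 + ((0 : Nat) : Int) - 1) 0))
              = decide (x ≠ y) := by
      have e1 : (1 + ((0 : Nat) : Int)) = (((1 : Nat)) : Int) := by norm_num
      have e2 : (1 + ((0 : Nat) : Int) - 1) = (((0 : Nat)) : Int) := by norm_num
      rw [e2, e1, PySem.List.pyGetD_natCast, PySem.List.pyGetD_natCast]
      simp [List.getD, ne_comm]
    rw [hshift, h0]
    by_cases hxy : x = y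
    · rw [if_neg (by simp [hxy])]
      push_cast
      rw [ih y]
      subst hxy
      simp [pvCnt]
    · rw [if_pos (by simp [hxy])]
      push_cast
      rw [ih y]
      simp only [pvCnt, if_pos hxy]
      ring

theorem pvFold_eq_cnt (l : List Int) :
    (PySem.List.pyRange 1 (l.length : Int) 1).foldl
        (fun changes i =>
          if PySem.List.pyGetD l i 0 ≠ PySem.List.pyGetD l (i - 1) 0 then
            changes + 1
          else changes) (0 : Int) = pvCnt l := by
  rw [PySem.List.foldl_ite_add_one, PySem.List.pyRange_one, List.countP_map]
  cases l with
  | nil => rfl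
  | cons x xs =>
    have hn : ((((x :: xs).length : Int) - 1).toNat) = xs.length := by simp
    rw [hn, ← pvCountP_eq_cnt xs x]
    norm_num [Function.comp_def]

theorem pvCC_eq_cnt (l : List Int) : pvCC l 0 l.length = pvCnt l := by
  rw [pvCC_eq_seg l l.length 0 l.length (by omega)]
  cases l with
  | nil => rfl
  | cons x xs => exact pvSeg_zero_eq_cnt xs x

-- ===== VERDICT (by name: the statement is the Claim_ definition above) =====
theorem detect_mood_volatility_spec : Claim_equal_detect_mood_volatility := by
  intro history _
  unfold Spec_detect_mood_volatility detect_mood_volatility detect_mood_volatility_alt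
  by_cases hg : history = [] ∨ history.length < 4
  · rw [if_pos hg, if_pos hg]
  · rw [if_neg hg, if_neg hg]
    simp only [pvFold_eq_cnt, pvCC_eq_cnt]
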